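-- pv_equiv track=rewrite | github.com/jeromebenton-edu/cookbookAI | scripts/manual_labeler.py | find_word_sequence
-- ===== SOURCE A (Python) =====
-- def find_word_sequence(words, search_words):
--     """Find a sequence of words in the word list."""
--     # Try exact match first
--     for i in range(len(words) - len(search_words) + 1):
--         match = True
--         for j, search_word in enumerate(search_words):
--             # Normalize for comparison
--             page_word = words[i + j].lower().rstrip('.,;:')
--             search_word_norm = search_word.lower().rstrip('.,;:')
--
--             if page_word != search_word_norm:
--                 match = False
--                 break
--
--         if match:
--             return list(range(i, i + len(search_words)))
--
--     return None
-- ===== SOURCE B (Python) =====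
-- def _norm(w):
--     return w.lower().rstrip('.,;:')
--
-- def find_word_sequence(words, search_words):
--     """Find a sequence of words in the word list."""
--     target = [_norm(w) for w in search_words]
--     m = len(target)
--     if m == 0:
--         return []
--     # Bitmask Shift-And (bitap): one left-to-right pass over the words; bit j of
--     # state is set iff the last j+1 words read match the first j+1 target words.
--     masks = {}
--     for j, t in enumerate(target):
--         masks[t] = masks.get(t, 0) | (1 << j)
--     goal = 1 << (m - 1)
--     state = 0
--     for i, w in enumerate(words):
--         state = ((state << 1) | 1) & masks.get(_norm(w), 0)
--         if state & goal:
--             return list(range(i - m + 1, i + 1))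
--     return None
-- ===== Notes on version B (the rewrite author's own statement) =====
-- stated objective: alternative
-- what changed: B replaces A's restart-at-every-start nested window comparison by the bit-parallel Shift-And (bitap) algorithm: it normalizes every word once, precomputes a bitmask per distinct normalized target word, and makes one left-to-right pass keeping a state integer whose bit j says 'the last j+1 words match the first j+1 target words'.
import Mathlib
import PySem

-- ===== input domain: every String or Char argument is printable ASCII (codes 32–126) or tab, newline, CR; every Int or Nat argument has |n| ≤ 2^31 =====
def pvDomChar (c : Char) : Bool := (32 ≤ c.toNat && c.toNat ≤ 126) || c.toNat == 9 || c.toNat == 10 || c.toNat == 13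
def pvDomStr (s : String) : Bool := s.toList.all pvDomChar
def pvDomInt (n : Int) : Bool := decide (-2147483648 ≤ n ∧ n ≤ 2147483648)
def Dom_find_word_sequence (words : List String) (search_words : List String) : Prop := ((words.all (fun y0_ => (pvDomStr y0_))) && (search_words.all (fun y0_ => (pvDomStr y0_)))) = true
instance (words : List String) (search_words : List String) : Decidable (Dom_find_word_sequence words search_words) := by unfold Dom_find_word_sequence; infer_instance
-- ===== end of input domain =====

-- B replaces A's restart-at-every-start nested scan by a Shift-And style single left-to-right
-- pass that normalizes each word once and maintains the set of matched target-prefix lengths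
-- (objective: alternative; different algorithm, same worst-case bound).

-- ===== PORT A =====
-- w.lower().rstrip('.,;:') on the char list; rstrip(chars) ported by hand as
-- reverse/dropWhile/reverse — exact: it removes precisely the trailing chars of that set.
def pvNormA (s : String) : List Char :=
  ((PySem.Chars.lower s.toList).reverse.dropWhile (fun c => ['.', ',', ';', ':'].contains c)).reverse

-- the inner 'for j, search_word in enumerate(search_words)' loop with its break
def pvInnerA (words : List String) (i : Int) : Nat → List String → Bool
  | _, [] => true
  | j, sw :: rest =>
    -- words[i + j]: always in range inside A's outer loop, so the default is never used
    let pw := (PySem.List.pyGet? words (i + (j : Int))).getD ""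
    if pvNormA pw ≠ pvNormA sw then false else pvInnerA words i (j + 1) rest

-- the outer 'for i in range(len(words) - len(search_words) + 1)' loop
def pvOuterA (words search : List String) : List Int → Option (List Int)
  | [] => none
  | i :: rest =>
    if pvInnerA words i 0 search then
      some (PySem.List.pyRange i (i + (search.length : Int)))
    else pvOuterA words search rest

def find_word_sequence (words : List String) (search_words : List String) : Option (List Int) :=
  pvOuterA words search_words
    (PySem.List.pyRange 0 ((words.length : Int) - (search_words.length : Int) + 1))

-- ===== PORT B =====
-- _norm(w), same hand-ported rstrip as on the A side
def pvNormB (s : String) : List Char :=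
  ((PySem.Chars.lower s.toList).reverse.dropWhile (fun c => ['.', ',', ';', ':'].contains c)).reverse

-- 'for j, t in enumerate(target): masks[t] = masks.get(t, 0) | (1 << j)' (enumerate → index counter)
def pvMasksB : Nat → List (List Char) → PySem.Dict (List Char) Int → PySem.Dict (List Char) Int
  | _, [], d => d
  | j, t :: rest, d =>
    pvMasksB (j + 1) rest (d.insert t (PySem.Int.bor (d.getD t 0) ((1 : Int) <<< j)))

-- 'for i, w in enumerate(words): state = ((state << 1) | 1) & masks.get(_norm(w), 0); if state & goal: ...'
def pvScanB (masks : PySem.Dict (List Char) Int) (m goal : Int) :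
    Int → Int → List String → Option (List Int)
  | _, _, [] => none
  | i, state, w :: rest =>
    let state' := PySem.Int.band (PySem.Int.bor (state <<< (1 : Nat)) 1) (masks.getD (pvNormB w) 0)
    if PySem.Int.band state' goal ≠ 0 then some (PySem.List.pyRange (i - m + 1) (i + 1))
    else pvScanB masks m goal (i + 1) state' rest

def find_word_sequence_alt (words : List String) (search_words : List String) : Option (List Int) :=
  let target := search_words.map pvNormB
  let m : Int := (target.length : Int)
  if m = 0 then some []
  else pvScanB (pvMasksB 0 target PySem.Dict.empty) m ((1 : Int) <<< (m - 1).toNat) 0 0 words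

-- ===== PRECONDITION & SPEC =====
def Spec_find_word_sequence (words : List String) (search_words : List String) (out : Option (List Int)) : Prop := out = find_word_sequence_alt words search_words
instance (words : List String) (search_words : List String) (out : Option (List Int)) : Decidable (Spec_find_word_sequence words search_words out) := by unfold Spec_find_word_sequence; infer_instance

-- ===== CLAIM (what is proved, stated in full; the proofs are below) =====
def Claim_equal_find_word_sequence : Prop := ∀ (words : List String) (search_words : List String), Dom_find_word_sequence words search_words → Spec_find_word_sequence words search_words (find_word_sequence words search_words)

-- ===== LEMMAS AND PROOFS =====

theorem pvNorm_eq : pvNormA = pvNormB := rfl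

-- 'window of length |T| starting at s (in the normalized word list N) equals T'
abbrev pvMatchW (N T : List (List Char)) (s : Nat) : Prop := (N.drop s).take T.length = T

-- 'the last l of the first k normalized words equal the first l of T'
abbrev pvSuffEq (N T : List (List Char)) (k l : Nat) : Prop := (N.take k).drop (k - l) = T.take l

-- first index t with s ≤ t < s + c and p t (reference spec both ports are proved against)
def pvSpecFirst (p : Nat → Bool) : Nat → Nat → Option Nat
  | _, 0 => none
  | s, c + 1 => if p s then some s else pvSpecFirst p (s + 1) c

theorem pvSpecFirst_eq_none (p : Nat → Bool) :
    ∀ (c s : Nat), (∀ t, s ≤ t → t < s + c → p t = false) → pvSpecFirst p s c = none := by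
  intro c
  induction c with
  | zero => intro s _; rfl
  | succ c ih =>
    intro s h
    rw [pvSpecFirst, h s (le_refl s) (by omega), if_neg (by simp)]
    exact ih (s + 1) (fun t h1 h2 => h t (by omega) (by omega))

theorem pvSpecFirst_eq_some (p : Nat → Bool) :
    ∀ (c s a : Nat), s ≤ a → a < s + c → p a = true → (∀ t, s ≤ t → t < a → p t = false) →
      pvSpecFirst p s c = some a := by
  intro c
  induction c with
  | zero => intro s a h1 h2; omega
  | succ c ih =>
    intro s a h1 h2 hp hmin
    rw [pvSpecFirst]
    by_cases hsa : s = a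
    · subst hsa; rw [if_pos hp]
    · rw [if_neg (by rw [hmin s (le_refl s) (by omega)]; simp)]
      exact ih (s + 1) a (by omega) (by omega) hp (fun t ht1 ht2 => hmin t (by omega) ht2)

theorem pvSpecFirst_congr (p q : Nat → Bool) :
    ∀ (c s : Nat), (∀ t, s ≤ t → t < s + c → p t = q t) → pvSpecFirst p s c = pvSpecFirst q s c := by
  intro c
  induction c with
  | zero => intro s _; rfl
  | succ c ih =>
    intro s h
    rw [pvSpecFirst, pvSpecFirst, h s (le_refl s) (by omega),
        ih (s + 1) (fun t h1 h2 => h t (by omega) (by omega))]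

theorem pvInnerA_iff (words : List String) :
    ∀ (search : List String) (i j : Nat), i + j + search.length ≤ words.length →
      (pvInnerA words (i : Int) j search = true ↔
        (List.take search.length (List.drop (i + j) words)).map pvNormA = search.map pvNormA) := by
  intro search
  induction search with
  | nil =>
    intro i j _
    simp [pvInnerA]
  | cons sw rest ih =>
    intro i j h
    have hij : i + j < words.length := by simp at h; omega
    have hidx : (i : Int) + (j : Int) = ((i + j : Nat) : Int) := by push_cast; ring
    have hget : PySem.List.pyGet? words ((i : Int) + (j : Int)) = some (words[i + j]) := by
      rw [hidx, PySem.List.pyGet?_natCast, List.getElem?_eq_getElem hij]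
    have hdrop : List.drop (i + j) words = words[i + j] :: List.drop (i + j + 1) words :=
      List.drop_eq_getElem_cons hij
    rw [pvInnerA, hget]
    simp only [Option.getD_some, hdrop, List.length_cons, List.take_succ_cons, List.map_cons]
    by_cases heq : pvNormA words[i + j] = pvNormA sw
    · have hrec := ih i (j + 1) (by simp at h ⊢; omega)
      have : i + (j + 1) = i + j + 1 := by omega
      rw [this] at hrec
      simp [heq, hrec]
    · simp [heq]

-- A's outer loop over range(s, s+c) is the reference first-match search
theorem pvOuterA_range (words search : List String) :
    ∀ (c s : Nat),
      pvOuterA words search (PySem.List.pyRange (s : Int) ((s : Int) + (c : Int))) =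
        (pvSpecFirst (fun t => pvInnerA words (t : Int) 0 search) s c).map
          (fun (t : Nat) => PySem.List.pyRange (t : Int) ((t : Int) + (search.length : Int))) := by
  intro c
  induction c with
  | zero =>
    intro s
    rw [show ((s : Int) + (0 : Nat) : Int) = (s : Int) by push_cast; ring,
        PySem.List.pyRange_one_eq_nil (le_refl _)]
    rfl
  | succ c ih =>
    intro s
    rw [PySem.List.pyRange_one_cons (by push_cast; omega)]
    rw [pvOuterA, pvSpecFirst]
    by_cases hp : pvInnerA words (s : Int) 0 search = true
    · rw [if_pos hp, if_pos hp]; rfl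
    · rw [if_neg hp, if_neg hp]
      have := ih (s + 1)
      rw [show (((s + 1 : Nat) : Int) + (c : Int)) = ((s : Int) + ((c + 1 : Nat) : Int)) by
            push_cast; ring] at this
      rw [show ((s : Int) + 1) = ((s + 1 : Nat) : Int) by push_cast; ring]
      exact this

theorem pvSuffEq_step (N T : List (List Char)) (k l : Nat) (hk : k < N.length)
    (hl : l < T.length) (hlk : l ≤ k) :
    pvSuffEq N T (k + 1) (l + 1) ↔ (pvSuffEq N T k l ∧ N[k] = T[l]) := by
  unfold pvSuffEq
  have h1 : N.take (k + 1) = N.take k ++ [N[k]] := by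
    rw [List.take_add_one, List.getElem?_eq_getElem hk]; rfl
  have h2 : T.take (l + 1) = T.take l ++ [T[l]] := by
    rw [List.take_add_one, List.getElem?_eq_getElem hl]; rfl
  have h3 : (k + 1) - (l + 1) = k - l := by omega
  rw [h1, h2, h3, List.drop_append_of_le_length (by simp; omega),
      ← List.concat_eq_append, ← List.concat_eq_append, List.concat_inj]

theorem pvSuffEq_full (N T : List (List Char)) (k : Nat) (hm : T.length ≤ k + 1) :
    pvSuffEq N T (k + 1) T.length ↔ pvMatchW N T (k + 1 - T.length) := by
  unfold pvSuffEq pvMatchW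
  rw [List.take_length, List.drop_take, show (k + 1) - ((k + 1) - T.length) = T.length by omega]

-- shifting a Nat cast is the cast of the Nat shift
theorem pvShift_natCast (n k : Nat) : ((n : Int) <<< k) = ((n <<< k : Nat) : Int) :=
  Int.mem_toNat?.mp rfl

theorem pvAnd_two_pow_ne (a i : Nat) : (a &&& 2 ^ i ≠ 0) ↔ a.testBit i = true := by
  rw [Nat.and_two_pow]
  cases h : a.testBit i
  · simp
  · simp [(Nat.two_pow_pos i).ne']

-- the masks dict: bit i of masks[t] is set iff target[i] = t
theorem pvMasksB_build :
    ∀ (rest : List (List Char)) (j : Nat) (d : PySem.Dict (List Char) Int),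
      (∀ t, ∃ aN : Nat, d.getD t 0 = (aN : Int)) →
      ∀ t, ∃ mN : Nat, (pvMasksB j rest d).getD t 0 = (mN : Int) ∧
        (∀ i : Nat, mN.testBit i = true ↔
          ((d.getD t 0).toNat.testBit i = true ∨ (j ≤ i ∧ rest[i - j]? = some t))) := by
  intro rest
  induction rest with
  | nil =>
    intro j d hinv t
    obtain ⟨aN, ha⟩ := hinv t
    exact ⟨aN, ha, by intro i; rw [ha]; simp⟩
  | cons t0 rest' ih =>
    intro j d hinv t
    obtain ⟨aN, ha⟩ := hinv t0
    have hval : (d.insert t0 (PySem.Int.bor (d.getD t0 0) ((1 : Int) <<< j))).getD t0 0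
        = ((aN ||| 2 ^ j : Nat) : Int) := by
      rw [PySem.Dict.getD_insert_self, ha, show ((1 : Int)) = ((1 : Nat) : Int) by norm_num,
          pvShift_natCast, PySem.Int.bor_natCast, Nat.one_shiftLeft]
    have hinv' : ∀ t, ∃ aN : Nat,
        (d.insert t0 (PySem.Int.bor (d.getD t0 0) ((1 : Int) <<< j))).getD t 0 = (aN : Int) := by
      intro t
      by_cases h : t = t0
      · subst h; exact ⟨aN ||| 2 ^ j, hval⟩
      · rw [PySem.Dict.getD_insert, if_neg h]; exact hinv t
    obtain ⟨mN, hm1, hm2⟩ := ih (j + 1) _ hinv' t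
    rw [pvMasksB]
    refine ⟨mN, hm1, ?_⟩
    intro i
    rw [hm2 i]
    by_cases ht : t = t0
    · subst ht
      rw [hval]
      simp only [Int.toNat_natCast, Nat.testBit_or, Nat.testBit_two_pow, ha]
      constructor
      · rintro (h | h)
        · rcases Bool.or_eq_true_iff.mp h with h | h
          · exact Or.inl h
          · have : j = i := by simpa using h
            subst this
            exact Or.inr ⟨le_refl j, by simp⟩
        · exact Or.inr ⟨by omega, by
            rw [show i - j = (i - (j + 1)) + 1 by omega, List.getElem?_cons_succ]
            exact h.2⟩
      · rintro (h | ⟨hji, hidx⟩)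
        · exact Or.inl (by rw [h]; simp)
        · by_cases hij : i = j
          · subst hij; exact Or.inl (by simp)
          · refine Or.inr ⟨by omega, ?_⟩
            rw [show i - j = (i - (j + 1)) + 1 by omega, List.getElem?_cons_succ] at hidx
            exact hidx
    · have hd : (d.insert t0 (PySem.Int.bor (d.getD t0 0) ((1 : Int) <<< j))).getD t 0
          = d.getD t 0 := by rw [PySem.Dict.getD_insert, if_neg ht]
      rw [hd]
      constructor
      · rintro (h | h)
        · exact Or.inl h
        · exact Or.inr ⟨by omega, by
            rw [show i - j = (i - (j + 1)) + 1 by omega, List.getElem?_cons_succ]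
            exact h.2⟩
      · rintro (h | ⟨hji, hidx⟩)
        · exact Or.inl h
        · by_cases hij : i = j
          · subst hij
            rw [Nat.sub_self, List.getElem?_cons_zero] at hidx
            exact absurd (Option.some_inj.mp hidx) (fun he => ht he.symm)
          · refine Or.inr ⟨by omega, ?_⟩
            rw [show i - j = (i - (j + 1)) + 1 by omega, List.getElem?_cons_succ] at hidx
            exact hidx

theorem pvMask_bit (T : List (List Char)) (t : List Char) :
    ∃ mN : Nat, (pvMasksB 0 T PySem.Dict.empty).getD t 0 = (mN : Int) ∧
      (∀ i : Nat, mN.testBit i = true ↔ T[i]? = some t) := by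
  obtain ⟨mN, h1, h2⟩ := pvMasksB_build T 0 PySem.Dict.empty
    (fun t => ⟨0, by rw [PySem.Dict.getD_empty]; rfl⟩) t
  refine ⟨mN, h1, fun i => ?_⟩
  rw [h2 i, PySem.Dict.getD_empty]
  simp

-- bits of the updated state = prefix-suffix matches one word longer
theorem pvState_step (words : List String) (T : List (List Char)) (sN : Nat)
    (k : Nat) (w : String) (hw : words[k]? = some w) (mN : Nat)
    (hmask : ∀ i : Nat, mN.testBit i = true ↔ T[i]? = some (pvNormB w))
    (hbits : ∀ j : Nat, sN.testBit j = true ↔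
      (j + 1 ≤ k ∧ j + 1 < T.length ∧ pvSuffEq (words.map pvNormB) T k (j + 1))) :
    ∀ j : Nat, ((sN <<< 1 ||| 1) &&& mN).testBit j = true ↔
      (j + 1 ≤ k + 1 ∧ j + 1 ≤ T.length ∧ pvSuffEq (words.map pvNormB) T (k + 1) (j + 1)) := by
  have hkw : k < words.length := (List.getElem?_eq_some_iff.mp hw).1
  have hNk : (words.map pvNormB)[k]'(by simpa using hkw) = pvNormB w := by
    have := List.getElem?_eq_some_iff.mp hw
    simp [List.getElem_map, this.2]
  intro j
  have h1bit : (1 : Nat).testBit j = decide (0 = j) := by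
    rw [show (1 : Nat) = 2 ^ 0 from rfl, Nat.testBit_two_pow]
  rw [Nat.testBit_and, Nat.testBit_or, Nat.testBit_shiftLeft, h1bit]
  constructor
  · intro h
    have hparts := Bool.and_eq_true_iff.mp h
    have hmb := (hmask j).mp hparts.2
    obtain ⟨hjT, hTj⟩ := List.getElem?_eq_some_iff.mp hmb
    rcases Bool.or_eq_true_iff.mp hparts.1 with hsh | h0
    · -- j ≥ 1: extend a previous prefix match
      have hand := Bool.and_eq_true_iff.mp hsh
      have h1j : 1 ≤ j := by simpa using of_decide_eq_true hand.1
      obtain ⟨hjk, hjm, hsuff⟩ := (hbits (j - 1)).mp hand.2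
      rw [show j - 1 + 1 = j by omega] at hjk hjm hsuff
      refine ⟨by omega, by omega, ?_⟩
      exact (pvSuffEq_step (words.map pvNormB) T k j (by simpa using hkw) hjT (by omega)).mpr
        ⟨hsuff, by rw [hNk, hTj]⟩
    · -- j = 0: a fresh match of the first target word
      have hj0 : j = 0 := (of_decide_eq_true h0).symm
      subst hj0
      refine ⟨by omega, by omega, ?_⟩
      refine (pvSuffEq_step (words.map pvNormB) T k 0 (by simpa using hkw) hjT (by omega)).mpr
        ⟨?_, by rw [hNk, hTj]⟩
      unfold pvSuffEq
      rw [Nat.sub_zero, List.take_zero, List.drop_take, Nat.sub_self, List.take_zero]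
  · rintro ⟨h1, h2, hsuff⟩
    have hjT : j < T.length := by omega
    have hstep := (pvSuffEq_step (words.map pvNormB) T k j (by simpa using hkw) hjT
      (by omega)).mp hsuff
    have hmb : mN.testBit j = true :=
      (hmask j).mpr (List.getElem?_eq_some_iff.mpr ⟨hjT, by rw [← hstep.2, hNk]⟩)
    rw [hmb, Bool.and_true]
    by_cases hj0 : j = 0
    · subst hj0; simp
    · have hsb : sN.testBit (j - 1) = true :=
        (hbits (j - 1)).mpr (by
          rw [show j - 1 + 1 = j by omega]
          exact ⟨by omega, hjT, hstep.1⟩)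
      rw [hsb, decide_eq_true (show 1 ≤ j by omega)]
      simp

-- the Shift-And scan computes the reference first-match search
theorem pvScanB_spec (words search : List String) :
    ∀ (rest : List String) (k sN : Nat),
      0 < search.length →
      words.drop k = rest →
      (∀ j : Nat, sN.testBit j = true ↔
        (j + 1 ≤ k ∧ j + 1 < search.length ∧
          pvSuffEq (words.map pvNormB) (search.map pvNormB) k (j + 1))) →
      (∀ s : Nat, s + search.length ≤ k →
        ¬ pvMatchW (words.map pvNormB) (search.map pvNormB) s) →
      pvScanB (pvMasksB 0 (search.map pvNormB) PySem.Dict.empty)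
          ((search.length : Int)) ((1 : Int) <<< (search.length - 1))
          (k : Int) ((sN : Int)) rest =
        (pvSpecFirst (fun t => decide (pvMatchW (words.map pvNormB) (search.map pvNormB) t))
            0 (words.length + 1 - search.length)).map
          (fun (t : Nat) => PySem.List.pyRange (t : Int) ((t : Int) + (search.length : Int))) := by
  intro rest
  induction rest with
  | nil =>
    intro k sN hm hdrop hbits h2
    have hnk : words.length ≤ k := by
      have := congrArg List.length hdrop; simp at this; omega
    rw [pvScanB, pvSpecFirst_eq_none]
    · rfl
    · intro t _ ht
      simp only [decide_eq_false_iff_not]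
      exact h2 t (by omega)
  | cons w rest' ih =>
    intro k sN hm hdrop hbits h2
    have hkw : k < words.length := by
      have := congrArg List.length hdrop; simp at this; omega
    have hw : words[k]? = some w := by
      have : (words.drop k)[0]? = some w := by rw [hdrop]; rfl
      rwa [List.getElem?_drop, Nat.add_zero] at this
    have hT : (search.map pvNormB).length = search.length := by simp
    obtain ⟨mN, hmval, hmbits⟩ := pvMask_bit (search.map pvNormB) (pvNormB w)
    have hchar := pvState_step words (search.map pvNormB) sN k w hw mN hmbits
      (by simpa only [hT] using hbits)
    simp only [pvScanB]
    have hstate : PySem.Int.band (PySem.Int.bor (((sN : Int)) <<< (1 : Nat)) 1)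
        ((pvMasksB 0 (search.map pvNormB) PySem.Dict.empty).getD (pvNormB w) 0)
        = (((sN <<< 1 ||| 1) &&& mN : Nat) : Int) := by
      rw [show ((1 : Int)) = ((1 : Nat) : Int) by norm_num, pvShift_natCast, hmval,
          PySem.Int.bor_natCast, PySem.Int.band_natCast]
    rw [hstate]
    have hgoal : ((1 : Int) <<< (search.length - 1)) = ((2 ^ (search.length - 1) : Nat) : Int) := by
      rw [show ((1 : Int)) = (((1 : Nat)) : Int) by norm_num, pvShift_natCast, Nat.one_shiftLeft]
    have hcond : (PySem.Int.band (((sN <<< 1 ||| 1) &&& mN : Nat) : Int)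
          ((1 : Int) <<< (search.length - 1)) ≠ 0) ↔
        ((sN <<< 1 ||| 1) &&& mN).testBit (search.length - 1) = true := by
      rw [hgoal, PySem.Int.band_natCast, ← pvAnd_two_pow_ne]
      exact_mod_cast Iff.rfl
    have hfullbit : ((sN <<< 1 ||| 1) &&& mN).testBit (search.length - 1) = true ↔
        (search.length ≤ k + 1 ∧
          pvSuffEq (words.map pvNormB) (search.map pvNormB) (k + 1) search.length) := by
      rw [hchar (search.length - 1), show search.length - 1 + 1 = search.length by omega]
      constructor
      · rintro ⟨a1, _, a3⟩; exact ⟨a1, a3⟩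
      · rintro ⟨a1, a3⟩; exact ⟨a1, by simp, a3⟩
    by_cases hmem : ((sN <<< 1 ||| 1) &&& mN).testBit (search.length - 1) = true
    · rw [if_pos (hcond.mpr hmem)]
      obtain ⟨hmk, hsuff⟩ := hfullbit.mp hmem
      have hmatch : pvMatchW (words.map pvNormB) (search.map pvNormB) (k + 1 - search.length) := by
        have := (pvSuffEq_full (words.map pvNormB) (search.map pvNormB) k
          (by simpa only [hT] using hmk)).mp (by simpa only [hT] using hsuff)
        simpa only [hT] using this
      rw [pvSpecFirst_eq_some _ _ 0 (k + 1 - search.length) (by omega) (by omega)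
        (by simpa using hmatch)
        (by
          intro t _ ht
          simp only [decide_eq_false_iff_not]
          exact h2 t (by omega))]
      simp only [Option.map_some]
      rw [show ((k : Int) - (search.length : Int) + 1)
            = ((k + 1 - search.length : Nat) : Int) by omega,
          show ((k : Int) + 1)
            = ((k + 1 - search.length : Nat) : Int) + (search.length : Int) by omega]
    · rw [if_neg (fun hc => hmem (hcond.mp hc))]
      have hdrop' : words.drop (k + 1) = rest' := by
        have : words.drop (k + 1) = (words.drop k).drop 1 := by rw [List.drop_drop]
        rw [this, hdrop]; rfl
      have hbits' : ∀ j : Nat, ((sN <<< 1 ||| 1) &&& mN).testBit j = true ↔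
          (j + 1 ≤ k + 1 ∧ j + 1 < search.length ∧
            pvSuffEq (words.map pvNormB) (search.map pvNormB) (k + 1) (j + 1)) := by
        intro j
        rw [hchar j, hT]
        constructor
        · rintro ⟨a1, a2, a3⟩
          refine ⟨a1, ?_, a3⟩
          by_cases hjm : j + 1 = search.length
          · exfalso
            apply hmem
            rw [hfullbit]
            exact ⟨by omega, by rw [← hjm]; exact a3⟩
          · omega
        · rintro ⟨a1, a2, a3⟩
          exact ⟨a1, by omega, a3⟩
      have h2' : ∀ s : Nat, s + search.length ≤ k + 1 →
          ¬ pvMatchW (words.map pvNormB) (search.map pvNormB) s := by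
        intro s hs
        by_cases hsk : s + search.length ≤ k
        · exact h2 s hsk
        · have hseq : s = k + 1 - search.length := by omega
          have hmk : search.length ≤ k + 1 := by omega
          intro hmatch
          apply hmem
          rw [hfullbit]
          refine ⟨hmk, ?_⟩
          have := (pvSuffEq_full (words.map pvNormB) (search.map pvNormB) k
            (by simpa only [hT] using hmk)).mpr (by rw [hT, ← hseq]; exact hmatch)
          simpa only [hT] using this
      have := ih (k + 1) ((sN <<< 1 ||| 1) &&& mN) hm hdrop' hbits' h2'
      rw [show ((k : Int) + 1) = ((k + 1 : Nat) : Int) by push_cast; ring]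
      exact this

-- ===== VERDICT (by name: the statement is the Claim_ definition above) =====
theorem find_word_sequence_spec : Claim_equal_find_word_sequence := by
  intro words search _
  unfold Spec_find_word_sequence find_word_sequence find_word_sequence_alt
  simp only [List.length_map]
  by_cases hm : search.length = 0
  · -- empty pattern: A's first candidate i = 0 matches vacuously, B returns [] directly
    obtain rfl : search = [] := List.length_eq_zero_iff.mp hm
    rw [if_pos (by simp)]
    rw [show ((words.length : Int) - (([] : List String).length : Int) + 1)
          = (0 : Int) + ((words.length + 1 : Nat) : Int) by push_cast; simp]
    rw [PySem.List.pyRange_one_cons (by push_cast; omega)]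
    rw [pvOuterA]
    simp [pvInnerA, PySem.List.pyRange_one_eq_nil]
  · rw [if_neg (by exact_mod_cast hm)]
    have hm' : 0 < search.length := by omega
    have hB := pvScanB_spec words search words 0 0 hm' (by rfl)
      (by intro j; simp)
      (by intro s hs; omega)
    simp only [Nat.cast_zero] at hB
    rw [show (((search.length : Int) - 1)).toNat = search.length - 1 by omega]
    rw [hB]
    by_cases hn : search.length ≤ words.length + 1
    · rw [show ((words.length : Int) - (search.length : Int) + 1)
            = ((words.length + 1 - search.length : Nat) : Int) by omega]
      have hA := pvOuterA_range words search (words.length + 1 - search.length) 0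
      simp only [Nat.cast_zero, zero_add] at hA
      rw [hA]
      congr 1
      apply pvSpecFirst_congr
      intro t _ ht
      have hbound : t + 0 + search.length ≤ words.length := by omega
      have hiff := pvInnerA_iff words search t 0 hbound
      rw [Nat.add_zero] at hiff
      have : pvMatchW (words.map pvNormB) (search.map pvNormB) t ↔
          (List.take search.length (List.drop t words)).map pvNormA = search.map pvNormA := by
        unfold pvMatchW
        rw [pvNorm_eq, List.length_map, ← List.map_drop, ← List.map_take]
      rw [Bool.eq_iff_iff, hiff, decide_eq_true_iff]
      exact this.symm
    · -- pattern longer than the text: both searches are empty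
      rw [PySem.List.pyRange_one_eq_nil (by omega)]
      rw [show words.length + 1 - search.length = 0 by omega]
      rfl
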